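-- pv_equiv track=rewrite | github.com/jeremyky/autonomous-racing | src/final_race/racelines/color_sectors.py | get_sector_color
-- ===== SOURCE A (Python) =====
-- sectors = [
--     (0,"DANGER"),
--     (1,"FREE"),
--     (15,"MID"),
--     (21,"FREE"),
--     (32,"MID"),
--     (40,"FREE"),
--     (61,"MID"),
--     (71,"DANGER"),
--     (75,"MID"),
--     (83,"DANGER")
-- ]
--
-- sector_colors = {
--     "MID": "blue",
--     "FREE": "green",
--     "DANGER": "red"
-- }
--
-- def get_sector_color(index):
--     """Determine the color for a given index based on sectors."""
--     current_sector = "MID"  # Default sector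
--     for start_idx, sector in sectors:
--         if index >= start_idx:
--             current_sector = sector
--         else:
--             break
--     return sector_colors[current_sector]
-- ===== SOURCE B (Python) =====
-- sectors = [
--     (0,"DANGER"),
--     (1,"FREE"),
--     (15,"MID"),
--     (21,"FREE"),
--     (32,"MID"),
--     (40,"FREE"),
--     (61,"MID"),
--     (71,"DANGER"),
--     (75,"MID"),
--     (83,"DANGER")
-- ]
--
-- sector_colors = {
--     "MID": "blue",
--     "FREE": "green",
--     "DANGER": "red"
-- }
--
-- _starts = [s for s, _ in sectors]
--
-- def get_sector_color(index):
--     """Determine the color for a given index based on sectors (binary search)."""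
--     lo, hi = 0, len(_starts)
--     while lo < hi:
--         mid = (lo + hi) // 2
--         if index >= _starts[mid]:
--             lo = mid + 1
--         else:
--             hi = mid
--     sector = "MID" if lo == 0 else sectors[lo - 1][1]
--     return sector_colors[sector]
-- ===== Notes on version B (the rewrite author's own statement) =====
-- stated objective: alternative
-- what changed: Replaced the linear early-break scan of the sector table by a bisect_right-style binary search over the precomputed start indices (i==0 maps to the default 'MID').
import Mathlib
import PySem

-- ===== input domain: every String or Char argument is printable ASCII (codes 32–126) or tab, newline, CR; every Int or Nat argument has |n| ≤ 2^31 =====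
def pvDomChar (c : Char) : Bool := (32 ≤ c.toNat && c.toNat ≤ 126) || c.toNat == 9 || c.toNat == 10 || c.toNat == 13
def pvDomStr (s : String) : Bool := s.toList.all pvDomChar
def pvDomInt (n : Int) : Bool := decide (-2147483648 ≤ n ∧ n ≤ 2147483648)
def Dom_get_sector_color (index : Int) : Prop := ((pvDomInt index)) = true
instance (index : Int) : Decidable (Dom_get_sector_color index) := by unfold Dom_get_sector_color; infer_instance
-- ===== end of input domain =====

-- B replaces A's linear scan of the sector table by a binary search (bisect_right) over
-- the precomputed start indices; same return value everywhere (alternative/idiomatic).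

-- ===== PORT A =====
def pvSectors : List (Int × String) :=
  [(0,"DANGER"),(1,"FREE"),(15,"MID"),(21,"FREE"),(32,"MID"),
   (40,"FREE"),(61,"MID"),(71,"DANGER"),(75,"MID"),(83,"DANGER")]

def pvSectorColors : PySem.Dict String String :=
  (((PySem.Dict.empty).insert "MID" "blue").insert "FREE" "green").insert "DANGER" "red"

-- A's for-loop with break, as structural recursion carrying current_sector
def pvLoopA (index : Int) : List (Int × String) → String → String
  | [], cur => cur
  | (s, sec) :: rest, cur => if index ≥ s then pvLoopA index rest sec else cur

def get_sector_color (index : Int) : String :=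
  -- key is always one of the three present keys, so the KeyError branch never fires
  ((pvSectorColors.get? (pvLoopA index pvSectors "MID")).getD "")

-- ===== PORT B =====
def pvStarts : List Int := pvSectors.map Prod.fst

-- hand-written bisect_right loop of Source B
def pvBisR (index : Int) (lo hi : Nat) : Nat :=
  if _h : lo < hi then
    let mid := (lo + hi) / 2
    if index ≥ pvStarts.getD mid 0 then pvBisR index (mid + 1) hi
    else pvBisR index lo mid
  else lo
termination_by hi - lo
decreasing_by all_goals omega

def get_sector_color_alt (index : Int) : String :=
  let lo := pvBisR index 0 pvStarts.length
  let sector := if lo = 0 then "MID" else (pvSectors.getD (lo - 1) (0, "")).2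
  ((pvSectorColors.get? sector).getD "")

-- ===== PRECONDITION & SPEC =====
def Spec_get_sector_color (index : Int) (out : String) : Prop := out = get_sector_color_alt index
instance (index : Int) (out : String) : Decidable (Spec_get_sector_color index out) := by unfold Spec_get_sector_color; infer_instance

-- ===== CLAIM (what is proved, stated in full; the proofs are below) =====
def Claim_equal_get_sector_color : Prop := ∀ (index : Int), Dom_get_sector_color index → Spec_get_sector_color index (get_sector_color index)

-- ===== LEMMAS AND PROOFS =====

-- ===== VERDICT (by name: the statement is the Claim_ definition above) =====
theorem get_sector_color_spec : Claim_equal_get_sector_color := by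
  intro i _
  unfold Spec_get_sector_color get_sector_color get_sector_color_alt
  have hc : i < 0 ∨ (0 ≤ i ∧ i < 1) ∨ (1 ≤ i ∧ i < 15) ∨ (15 ≤ i ∧ i < 21) ∨ (21 ≤ i ∧ i < 32) ∨ (32 ≤ i ∧ i < 40) ∨ (40 ≤ i ∧ i < 61) ∨ (61 ≤ i ∧ i < 71) ∨ (71 ≤ i ∧ i < 75) ∨ (75 ≤ i ∧ i < 83) ∨ 83 ≤ i := by omega
  rcases hc with h | h | h | h | h | h | h | h | h | h | h
  · simp [pvBisR, pvLoopA, pvStarts, pvSectors, ge_iff_le, (show ¬ (0:Int) ≤ i by omega), (show ¬ (1:Int) ≤ i by omega), (show ¬ (15:Int) ≤ i by omega), (show ¬ (40:Int) ≤ i by omega)]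
  · simp [pvBisR, pvLoopA, pvStarts, pvSectors, ge_iff_le, (show (0:Int) ≤ i by omega), (show ¬ (1:Int) ≤ i by omega), (show ¬ (15:Int) ≤ i by omega), (show ¬ (40:Int) ≤ i by omega)]
  · simp [pvBisR, pvLoopA, pvStarts, pvSectors, ge_iff_le, (show (0:Int) ≤ i by omega), (show (1:Int) ≤ i by omega), (show ¬ (15:Int) ≤ i by omega), (show ¬ (40:Int) ≤ i by omega)]
  · simp [pvBisR, pvLoopA, pvStarts, pvSectors, ge_iff_le, (show (0:Int) ≤ i by omega), (show (1:Int) ≤ i by omega), (show (15:Int) ≤ i by omega), (show ¬ (21:Int) ≤ i by omega), (show ¬ (32:Int) ≤ i by omega), (show ¬ (40:Int) ≤ i by omega)]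
  · simp [pvBisR, pvLoopA, pvStarts, pvSectors, ge_iff_le, (show (0:Int) ≤ i by omega), (show (1:Int) ≤ i by omega), (show (15:Int) ≤ i by omega), (show (21:Int) ≤ i by omega), (show ¬ (32:Int) ≤ i by omega), (show ¬ (40:Int) ≤ i by omega)]
  · simp [pvBisR, pvLoopA, pvStarts, pvSectors, ge_iff_le, (show (0:Int) ≤ i by omega), (show (1:Int) ≤ i by omega), (show (15:Int) ≤ i by omega), (show (21:Int) ≤ i by omega), (show (32:Int) ≤ i by omega), (show ¬ (40:Int) ≤ i by omega)]
  · simp [pvBisR, pvLoopA, pvStarts, pvSectors, ge_iff_le, (show (0:Int) ≤ i by omega), (show (1:Int) ≤ i by omega), (show (15:Int) ≤ i by omega), (show (21:Int) ≤ i by omega), (show (32:Int) ≤ i by omega), (show (40:Int) ≤ i by omega), (show ¬ (61:Int) ≤ i by omega), (show ¬ (71:Int) ≤ i by omega), (show ¬ (75:Int) ≤ i by omega)]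
  · simp [pvBisR, pvLoopA, pvStarts, pvSectors, ge_iff_le, (show (0:Int) ≤ i by omega), (show (1:Int) ≤ i by omega), (show (15:Int) ≤ i by omega), (show (21:Int) ≤ i by omega), (show (32:Int) ≤ i by omega), (show (40:Int) ≤ i by omega), (show (61:Int) ≤ i by omega), (show ¬ (71:Int) ≤ i by omega), (show ¬ (75:Int) ≤ i by omega)]
  · simp [pvBisR, pvLoopA, pvStarts, pvSectors, ge_iff_le, (show (0:Int) ≤ i by omega), (show (1:Int) ≤ i by omega), (show (15:Int) ≤ i by omega), (show (21:Int) ≤ i by omega), (show (32:Int) ≤ i by omega), (show (40:Int) ≤ i by omega), (show (61:Int) ≤ i by omega), (show (71:Int) ≤ i by omega), (show ¬ (75:Int) ≤ i by omega)]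
  · simp [pvBisR, pvLoopA, pvStarts, pvSectors, ge_iff_le, (show (0:Int) ≤ i by omega), (show (1:Int) ≤ i by omega), (show (15:Int) ≤ i by omega), (show (21:Int) ≤ i by omega), (show (32:Int) ≤ i by omega), (show (40:Int) ≤ i by omega), (show (61:Int) ≤ i by omega), (show (71:Int) ≤ i by omega), (show (75:Int) ≤ i by omega), (show ¬ (83:Int) ≤ i by omega)]
  · simp [pvBisR, pvLoopA, pvStarts, pvSectors, ge_iff_le, (show (0:Int) ≤ i by omega), (show (1:Int) ≤ i by omega), (show (15:Int) ≤ i by omega), (show (21:Int) ≤ i by omega), (show (32:Int) ≤ i by omega), (show (40:Int) ≤ i by omega), (show (61:Int) ≤ i by omega), (show (71:Int) ≤ i by omega), (show (75:Int) ≤ i by omega), (show (83:Int) ≤ i by omega)]
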